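-- pv_equiv track=rewrite | github.com/tue-mdse/conferenceMetrics | tools/python/metrics.py | __absWindowDiff
-- ===== SOURCE A (Python) =====
-- def __absWindowDiff(data, k):
--     d = {}
--     years = sorted(data.keys())
--     for year in years[k:]:
--         previous = set()
--         for y in [y for y in years[years.index(year)-k: years.index(year)]]:
--             previous.update(data[y])
--         d[year] = len(data[year].difference(previous))
--     return d
-- ===== SOURCE B (Python) =====
-- def __absWindowDiff(data, k):
--     # One pass over the sorted years with a sliding-window element-count dict:
--     # counts[e] = number of years in the k-year window before the current year containing e.
--     result = {}
--     counts = {}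
--     years = sorted(data)
--     for i, year in enumerate(years):
--         if i >= k:
--             result[year] = sum(1 for e in data[year] if counts.get(e, 0) == 0)
--         for e in data[year]:
--             counts[e] = counts.get(e, 0) + 1
--         if i >= k:
--             for e in data[years[i - k]]:
--                 counts[e] = counts.get(e, 0) - 1
--     return result
-- ===== Notes on version B (the rewrite author's own statement) =====
-- stated objective: faster
-- what changed: Replaces A's per-year years.index() scans and per-year rebuild of the union of the whole k-year window by a single enumerate pass over the sorted years that maintains a sliding-window element-count dict, so each element is added and removed exactly once.
-- outside the precondition, e.g. on __absWindowDiff({1: {'a'}, 2: {'b'}}, -1): A returns {2: 1}, B raises IndexError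
import Mathlib
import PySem

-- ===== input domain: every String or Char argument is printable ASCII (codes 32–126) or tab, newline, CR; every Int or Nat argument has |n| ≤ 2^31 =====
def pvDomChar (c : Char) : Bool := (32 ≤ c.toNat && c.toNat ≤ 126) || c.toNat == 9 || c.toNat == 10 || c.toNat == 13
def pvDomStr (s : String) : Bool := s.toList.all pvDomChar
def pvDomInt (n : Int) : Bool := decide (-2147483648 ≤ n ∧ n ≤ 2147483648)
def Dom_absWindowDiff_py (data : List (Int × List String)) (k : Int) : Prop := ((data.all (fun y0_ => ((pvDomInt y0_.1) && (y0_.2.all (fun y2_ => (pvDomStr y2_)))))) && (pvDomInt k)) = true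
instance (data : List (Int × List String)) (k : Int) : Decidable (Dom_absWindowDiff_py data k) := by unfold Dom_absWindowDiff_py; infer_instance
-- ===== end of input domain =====

-- B replaces A's per-year re-scan of the whole k-year window (quadratic re-indexing plus a
-- rebuilt union set per year) by one pass over the sorted years with a sliding-window
-- element-count dict; equivalence is proved for nonnegative k and duplicate-free year lists.

-- ===== PORT A =====
-- data[y]: the dict's values are Python sets of strings, so the looked-up list is read as a set
def pvData (data : List (Int × List String)) (y : Int) : PySem.Set String :=
  PySem.Set.ofList (((data.find? (fun q => q.1 == y)).map Prod.snd).getD [])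

def absWindowDiff_py (data : List (Int × List String)) (k : Int) : List (Int × Int) :=
  let years := PySem.List.sorted (data.map Prod.fst) (fun x => x) false
  let d := (PySem.List.slice years (some k) none).foldl (fun d year =>
      -- years.index(year): year is drawn from years, so the lookup never raises
      let i : Int := (((PySem.List.index? years year).getD 0 : Nat) : Int)
      let previous := (PySem.List.slice years (some (i - k)) (some i)).foldl
          (fun s y => PySem.Set.update s (pvData data y)) PySem.Set.empty
      d.insert year ((PySem.Set.diff (pvData data year) previous).length : Int))
    PySem.Dict.empty
  d.items

-- ===== PORT B =====
-- the loop body of B (counts[e] -= 1 is written counts[e] = counts.get(e,0) - 1, as in Source B)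
def pvStepB (data : List (Int × List String)) (k : Int) (years : List Int)
    (st : PySem.Dict String Int × List (Int × Int)) (p : Int × Int) :
    PySem.Dict String Int × List (Int × Int) :=
  let i := p.1
  let year := p.2
  let result := if k ≤ i then
      st.2 ++ [(year, ((pvData data year).countP (fun e => st.1.getD e 0 == 0) : Int))]
    else st.2
  let counts := (pvData data year).foldl (fun c e => c.insert e (c.getD e 0 + 1)) st.1
  let counts := if k ≤ i then
      (pvData data ((PySem.List.pyGet? years (i - k)).getD 0)).foldl
        (fun c e => c.insert e (c.getD e 0 - 1)) counts
    else counts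
  (counts, result)

-- result[year] = v appends: the years are the (distinct) keys of the Python dict `data`
def absWindowDiff_py_alt (data : List (Int × List String)) (k : Int) : List (Int × Int) :=
  let years := PySem.List.sorted (data.map Prod.fst) (fun x => x) false
  ((PySem.List.enumerate years 0).foldl (pvStepB data k years) (PySem.Dict.empty, [])).2

-- ===== PRECONDITION & SPEC =====
-- Pre_ restricts to the function's natural domain: a nonnegative window size k (for k < 0
-- Python slicing makes A read the LAST |k| years against an empty window — B raises there)
-- and duplicate-free year keys (the list stands for A's dict parameter, whose keys are unique;
-- on duplicates the first-match list reading is arbitrary).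
def Pre_absWindowDiff_py (data : List (Int × List String)) (k : Int) : Prop :=
  0 ≤ k ∧ (data.map Prod.fst).Nodup
instance (data : List (Int × List String)) (k : Int) : Decidable (Pre_absWindowDiff_py data k) := by unfold Pre_absWindowDiff_py; infer_instance

def pvWitness_absWindowDiff_py : (List (Int × List String)) × Int := ([(1, ["a"]), (2, ["a", "b"])], 1)

def Spec_absWindowDiff_py (data : List (Int × List String)) (k : Int) (out : List (Int × Int)) : Prop := out = absWindowDiff_py_alt data k
instance (data : List (Int × List String)) (k : Int) (out : List (Int × Int)) : Decidable (Spec_absWindowDiff_py data k out) := by unfold Spec_absWindowDiff_py; infer_instance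

-- ===== CLAIM (what is proved, stated in full; the proofs are below) =====
def Claim_equal_absWindowDiff_py : Prop := ∀ (data : List (Int × List String)) (k : Int), Dom_absWindowDiff_py data k → Pre_absWindowDiff_py data k → Spec_absWindowDiff_py data k (absWindowDiff_py data k)

-- ===== LEMMAS AND PROOFS =====

-- the sorted year list, its j-th entry's value set, and the size of e's count over the
-- window of the kn years before index i
def pvYears (data : List (Int × List String)) : List Int :=
  PySem.List.sorted (data.map Prod.fst) (fun x => x) false

def pvVal (data : List (Int × List String)) (j : Nat) : PySem.Set String :=
  pvData data ((pvYears data).getD j 0)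

def pvW (data : List (Int × List String)) (kn i : Nat) (e : String) : Nat :=
  (List.range' (i - kn) (i - (i - kn))).countP (fun j => decide (e ∈ pvVal data j))

def pvEntry (data : List (Int × List String)) (kn i : Nat) : Int × Int :=
  ((pvYears data).getD i 0,
   (((pvVal data i).countP (fun e => pvW data kn i e == 0) : Nat) : Int))

def pvTL (data : List (Int × List String)) (kn : Nat) : List (Int × Int) :=
  (List.range' kn ((pvYears data).length - kn)).map (pvEntry data kn)

-- general list facts not found in Mathlib/PySem (range'/range drop-take)
lemma pv_drop_range' (m : Nat) : ∀ (s n : Nat), (List.range' s n).drop m = List.range' (s + m) (n - m) := by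
  induction m with
  | zero => simp
  | succ m ih =>
    intro s n
    cases n with
    | zero => simp
    | succ n =>
      rw [List.range'_succ, List.drop_succ_cons, ih]
      congr 1 <;> omega

lemma pv_take_range' (m : Nat) : ∀ (s n : Nat), (List.range' s n).take m = List.range' s (min m n) := by
  induction m with
  | zero => simp
  | succ m ih =>
    intro s n
    cases n with
    | zero => simp
    | succ n => rw [List.range'_succ, List.take_succ_cons, ih, ← List.range'_succ]; congr 1; omega

lemma pv_drop_range (n m : Nat) : (List.range n).drop m = List.range' m (n - m) := by
  rw [List.range_eq_range', pv_drop_range']; simp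

lemma pv_self_eq_map_range (l : List Int) :
    l = (List.range l.length).map (fun j => l.getD j 0) := by
  apply List.ext_getElem
  · simp
  · intro i h1 h2
    simp only [List.getElem_map, List.getElem_range]
    rw [List.getD_eq_getElem]

lemma pv_drop_eq_map (l : List Int) (m : Nat) :
    l.drop m = (List.range' m (l.length - m)).map (fun j => l.getD j 0) := by
  conv_lhs => rw [pv_self_eq_map_range l]
  rw [← List.map_drop, pv_drop_range]

lemma pv_index?_nodup (l : List Int) (hl : l.Nodup) (i : Nat) (hi : i < l.length) :
    PySem.List.index? l (l.getD i 0) = some i := by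
  rw [List.getD_eq_getElem l 0 hi]
  cases h : PySem.List.index? l l[i] with
  | none =>
    exact absurd ((PySem.List.index?_eq_none_iff l l[i]).mp h) (by simp)
  | some j =>
    obtain ⟨hj, hval, _⟩ := PySem.List.getElem_of_index?_eq_some h
    exact congrArg some ((hl.getElem_inj_iff).mp hval)

lemma pv_mem_foldl_update {α : Type} (l : List α) (f : α → PySem.Set String) (s : PySem.Set String)
    (e : String) :
    e ∈ l.foldl (fun s y => PySem.Set.update s (f y)) s ↔ e ∈ s ∨ ∃ y ∈ l, e ∈ f y := by
  induction l generalizing s with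
  | nil => simp
  | cons x t ih => simp [ih, PySem.Set.mem_update, or_assoc]

lemma pv_getD_foldl_insert_sub_one (l : List String) (c : PySem.Dict String Int) (v : String) :
    (l.foldl (fun c e => c.insert e (c.getD e 0 - 1)) c).getD v 0 = c.getD v 0 - l.count v := by
  induction l generalizing c with
  | nil => simp
  | cons x t ih =>
    rw [List.foldl_cons, ih, PySem.Dict.getD_insert, List.count_cons]
    by_cases h : v = x
    · simp [h]; ring
    · have : ¬ (x == v) = true := by simpa using fun hxv => h hxv.symm
      simp [h, this]

lemma pv_filter_range (kn n : Nat) :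
    (List.range' 0 n).filter (fun i => decide (kn ≤ i)) = List.range' kn (n - kn) := by
  by_cases h : kn ≤ n
  · have hsplit : List.range' 0 kn ++ List.range' kn (n - kn) = List.range' 0 n := by
      have := List.range'_append (s := 0) (m := kn) (n := n - kn) (step := 1)
      simpa [Nat.add_sub_cancel' h] using this
    rw [← hsplit, List.filter_append]
    have h1 : (List.range' 0 kn).filter (fun i => decide (kn ≤ i)) = [] := by
      apply List.filter_eq_nil_iff.mpr
      intro a ha
      simp only [List.mem_range'] at ha
      obtain ⟨t, ht, rfl⟩ := ha
      simp
      omega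
    have h2 : (List.range' kn (n - kn)).filter (fun i => decide (kn ≤ i)) = List.range' kn (n - kn) := by
      apply List.filter_eq_self.mpr
      intro a ha
      simp only [List.mem_range'] at ha
      obtain ⟨t, ht, rfl⟩ := ha
      simp
    rw [h1, h2, List.nil_append]
  · have hn : n - kn = 0 := by omega
    rw [hn]
    apply List.filter_eq_nil_iff.mpr
    intro a ha
    simp only [List.mem_range'] at ha
    obtain ⟨t, ht, rfl⟩ := ha
    simp; omega

-- window-count bookkeeping: pvW at i+1 from pvW at i
lemma pv_wstep (data : List (Int × List String)) (kn m : Nat) (e : String) :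
    (pvW data kn (m + 1) e : Int) =
      pvW data kn m e + (if e ∈ pvVal data m then 1 else 0)
        - (if kn ≤ m then (if e ∈ pvVal data (m - kn) then 1 else 0) else 0) := by
  simp only [pvW]
  by_cases hm : kn ≤ m
  · have h1 : m + 1 - (m + 1 - kn) = kn := by omega
    have h2 : m - (m - kn) = kn := by omega
    have h3 : m + 1 - kn = (m - kn) + 1 := by omega
    rw [h1, h2, h3, if_pos hm]
    have hc : List.range' (m - kn) (kn + 1) = List.range' (m - kn) kn ++ [m] := by
      rw [List.range'_concat]; congr 2; omega
    have hs : List.range' (m - kn) (kn + 1) = (m - kn) :: List.range' (m - kn + 1) kn :=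
      List.range'_succ
    have h4 := List.countP_append (l₁ := List.range' (m - kn) kn) (l₂ := [m]) (p := fun j => decide (e ∈ pvVal data j))
    have h5 := List.countP_cons (p := fun j => decide (e ∈ pvVal data j)) (a := m - kn) (l := List.range' (m - kn + 1) kn)
    have hcs : List.range' (m - kn) kn ++ [m] = (m - kn) :: List.range' (m - kn + 1) kn := by
      rw [← hc, hs]
    rw [hcs] at h4
    rw [h4] at h5
    by_cases hA : e ∈ pvVal data m <;> by_cases hB : e ∈ pvVal data (m - kn) <;>
      simp [hA, hB] at h5 ⊢ <;> omega
  · have h0 : m + 1 - kn = 0 := by omega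
    have h0' : m - kn = 0 := by omega
    rw [h0, h0', if_neg hm]
    simp only [Nat.sub_zero]
    rw [List.range'_concat]
    rw [List.countP_append]
    by_cases hA : e ∈ pvVal data m <;> simp [hA]


lemma pv_A_eq (data : List (Int × List String)) (k : Int) (hk : 0 ≤ k)
    (hnd : (data.map Prod.fst).Nodup) :
    absWindowDiff_py data k = pvTL data k.toNat := by
  have hy : (pvYears data).Nodup :=
    ((PySem.List.sorted_perm (data.map Prod.fst) (fun x => x) false).symm.nodup) hnd
  simp only [absWindowDiff_py]
  rw [← pvYears]
  rw [PySem.List.slice_from _ hk]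
  rw [PySem.Dict.items_foldl_insert_fresh _ (fun a => a) _ _ ?hfresh ?hnod]
  case hfresh => intro a _; rfl
  case hnod => simpa using (List.drop_sublist _ _).nodup hy
  rw [show (PySem.Dict.empty : PySem.Dict Int Int).items = [] from rfl, List.nil_append]
  rw [pv_drop_eq_map, List.map_map]
  unfold pvTL
  apply List.map_congr_left
  intro i hi
  obtain ⟨t, ht, rfl⟩ := List.mem_range'.mp hi
  simp only [Nat.one_mul, Function.comp_apply] at *
  have hlt : k.toNat + t < (pvYears data).length := by omega
  rw [pv_index?_nodup _ hy _ hlt, Option.getD_some]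
  have h1 : (↑(k.toNat + t) : Int) - k = ((t : Nat) : Int) := by
    have := Int.toNat_of_nonneg hk; omega
  rw [h1, PySem.List.slice_natCast]
  have h2 : k.toNat + t - t = k.toNat := by omega
  rw [h2]
  rw [pv_drop_eq_map (pvYears data) t, ← List.map_take, pv_take_range']
  have h3 : min k.toNat ((pvYears data).length - t) = k.toNat := by omega
  rw [h3]
  simp only [pvEntry, Prod.mk.injEq]
  refine ⟨trivial, ?_⟩
  congr 1
  rw [List.foldl_map]
  rw [show pvData data ((pvYears data).getD (k.toNat + t) 0) = pvVal data (k.toNat + t) from rfl]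
  simp only [PySem.Set.diff]
  rw [← List.countP_eq_length_filter]
  apply List.countP_congr
  intro e he
  have hmem : e ∈ (List.range' t k.toNat).foldl
        (fun s j => s.update (pvData data ((pvYears data).getD j 0))) PySem.Set.empty
      ↔ ∃ j ∈ List.range' t k.toNat, e ∈ pvVal data j := by
    simpa [pvVal] using pv_mem_foldl_update (List.range' t k.toNat) (pvVal data) PySem.Set.empty e
  have e1 : k.toNat + t - k.toNat = t := by omega
  have e2 : k.toNat + t - (k.toNat + t - k.toNat) = k.toNat := by omega
  have hw : pvW data k.toNat (k.toNat + t) e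
      = (List.range' t k.toNat).countP (fun j => decide (e ∈ pvVal data j)) := by
    simp only [pvW]; rw [e1, h2]
  rw [Bool.eq_iff_iff]
  simp only [Bool.not_eq_true', beq_iff_eq, Bool.eq_false_iff, ne_eq, PySem.Set.contains_iff,
    hw, List.countP_eq_zero]
  rw [hmem]
  simp

lemma pv_B_aux (data : List (Int × List String)) (k : Int) (hk : 0 ≤ k) :
    ∀ (t m : Nat), m + t = (pvYears data).length →
      ∀ (c : PySem.Dict String Int) (r : List (Int × Int)),
        (∀ e, c.getD e 0 = (pvW data k.toNat m e : Int)) →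
        ((PySem.List.enumerate ((pvYears data).drop m) (m : Int)).foldl
            (pvStepB data k (pvYears data)) (c, r)).2
          = r ++ ((List.range' m t).filter (fun i => decide (k.toNat ≤ i))).map (pvEntry data k.toNat) := by
  intro t
  induction t with
  | zero =>
    intro m hm c r hc
    have hnil : (pvYears data).drop m = [] := by rw [List.drop_eq_nil_iff]; omega
    simp [hnil, PySem.List.enumerate_nil]
  | succ t ih =>
    intro m hm c r hc
    have hmlt : m < (pvYears data).length := by omega
    rw [List.drop_eq_getElem_cons hmlt, PySem.List.enumerate_cons, List.foldl_cons]
    have hyear : (pvYears data)[m] = (pvYears data).getD m 0 := (List.getD_eq_getElem _ _ hmlt).symm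
    have hrange : List.range' m (t + 1) = m :: List.range' (m + 1) t := List.range'_succ
    by_cases hcase : k.toNat ≤ m
    · -- window is full: an entry is emitted, one year enters the window, one leaves
      have hki : k ≤ (m : Int) := by have := Int.toNat_of_nonneg hk; omega
      have harg : (PySem.List.pyGet? (pvYears data) ((m : Int) - k)).getD 0
          = (pvYears data).getD (m - k.toNat) 0 := by
        have hsub : ((m : Int) - k) = ((m - k.toNat : Nat) : Int) := by
          have := Int.toNat_of_nonneg hk; omega
        have hlt2 : m - k.toNat < (pvYears data).length := by omega
        rw [hsub, PySem.List.pyGet?_natCast, List.getElem?_eq_getElem hlt2, Option.getD_some,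
          List.getD_eq_getElem _ _ hlt2]
      have hstep : pvStepB data k (pvYears data) (c, r) ((m : Int), (pvYears data)[m])
          = ((pvData data ((pvYears data).getD (m - k.toNat) 0)).foldl
               (fun c e => c.insert e (c.getD e 0 - 1))
               ((pvData data ((pvYears data)[m])).foldl
                 (fun c e => c.insert e (c.getD e 0 + 1)) c),
             r ++ [((pvYears data)[m],
               ((pvData data ((pvYears data)[m])).countP (fun e => c.getD e 0 == 0) : Int))]) := by
        simp only [pvStepB, if_pos hki, harg]
      rw [hstep]
      have hc' : ∀ e, ((pvData data ((pvYears data).getD (m - k.toNat) 0)).foldl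
               (fun c e => c.insert e (c.getD e 0 - 1))
               ((pvData data ((pvYears data)[m])).foldl
                 (fun c e => c.insert e (c.getD e 0 + 1)) c)).getD e 0
          = (pvW data k.toNat (m + 1) e : Int) := by
        intro e
        rw [pv_getD_foldl_insert_sub_one, PySem.Dict.getD_foldl_insert_add_one, hc e,
          pv_wstep data k.toNat m e, if_pos hcase]
        have hn1 : (pvData data ((pvYears data)[m])).Nodup := PySem.Set.nodup_ofList _
        have hn2 : (pvData data ((pvYears data).getD (m - k.toNat) 0)).Nodup := PySem.Set.nodup_ofList _
        have c1 : (pvData data ((pvYears data)[m])).count e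
            = if e ∈ pvVal data m then 1 else 0 := by
          rw [hyear]
          by_cases hmem : e ∈ pvVal data m
          · rw [if_pos hmem]; exact List.count_eq_one_of_mem (hyear ▸ hn1) hmem
          · rw [if_neg hmem]; exact List.count_eq_zero.mpr hmem
        have c2 : (pvData data ((pvYears data).getD (m - k.toNat) 0)).count e
            = if e ∈ pvVal data (m - k.toNat) then 1 else 0 := by
          by_cases hmem : e ∈ pvVal data (m - k.toNat)
          · rw [if_pos hmem]; exact List.count_eq_one_of_mem hn2 hmem
          · rw [if_neg hmem]; exact List.count_eq_zero.mpr hmem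
        rw [c1, c2]
        by_cases hA : e ∈ pvVal data m <;> by_cases hB : e ∈ pvVal data (m - k.toNat) <;>
          simp [hA, hB]
      have hcast : ((m : Int) + 1) = ((m + 1 : Nat) : Int) := by push_cast; ring
      rw [hcast, ih (m + 1) (by omega) _ _ hc']
      rw [hrange, List.filter_cons_of_pos (by simpa using hcase), List.map_cons]
      have hentry : pvEntry data k.toNat m
          = ((pvYears data)[m],
             ((pvData data ((pvYears data)[m])).countP (fun e => c.getD e 0 == 0) : Int)) := by
        simp only [pvEntry, hyear, Prod.mk.injEq]
        refine ⟨trivial, ?_⟩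
        congr 1
        apply List.countP_congr
        intro e _
        rw [hc e]
        simp [Int.natCast_eq_zero]
      rw [hentry]
      simp
    · -- window still filling: no entry, the year only enters the window
      have hki : ¬ k ≤ (m : Int) := by have := Int.toNat_of_nonneg hk; omega
      have hstep : pvStepB data k (pvYears data) (c, r) ((m : Int), (pvYears data)[m])
          = ((pvData data ((pvYears data)[m])).foldl
               (fun c e => c.insert e (c.getD e 0 + 1)) c, r) := by
        simp only [pvStepB, if_neg hki]
      rw [hstep]
      have hc' : ∀ e, ((pvData data ((pvYears data)[m])).foldl
                 (fun c e => c.insert e (c.getD e 0 + 1)) c).getD e 0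
          = (pvW data k.toNat (m + 1) e : Int) := by
        intro e
        rw [PySem.Dict.getD_foldl_insert_add_one, hc e, pv_wstep data k.toNat m e, if_neg hcase]
        have hn1 : (pvData data ((pvYears data)[m])).Nodup := PySem.Set.nodup_ofList _
        have c1 : (pvData data ((pvYears data)[m])).count e
            = if e ∈ pvVal data m then 1 else 0 := by
          rw [hyear]
          by_cases hmem : e ∈ pvVal data m
          · rw [if_pos hmem]; exact List.count_eq_one_of_mem (hyear ▸ hn1) hmem
          · rw [if_neg hmem]; exact List.count_eq_zero.mpr hmem
        rw [c1]
        by_cases hA : e ∈ pvVal data m <;> simp [hA]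
      have hcast : ((m : Int) + 1) = ((m + 1 : Nat) : Int) := by push_cast; ring
      rw [hcast, ih (m + 1) (by omega) _ _ hc']
      rw [hrange, List.filter_cons_of_neg (by simpa using hcase)]

lemma pv_B_eq (data : List (Int × List String)) (k : Int) (hk : 0 ≤ k) :
    absWindowDiff_py_alt data k = pvTL data k.toNat := by
  simp only [absWindowDiff_py_alt]
  rw [← pvYears]
  have h0 := pv_B_aux data k hk ((pvYears data).length) 0 (by omega) PySem.Dict.empty []
    (fun e => by simp [pvW, List.range'_zero])
  simp only [List.drop_zero, Nat.cast_zero] at h0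
  rw [h0, List.nil_append, pv_filter_range]
  rfl

-- ===== VERDICT (by name: the statement is the Claim_ definition above) =====
theorem absWindowDiff_py_spec : Claim_equal_absWindowDiff_py := by
  intro data k _hdom hpre
  obtain ⟨hk, hnd⟩ := hpre
  unfold Spec_absWindowDiff_py
  rw [pv_A_eq data k hk hnd, pv_B_eq data k hk]
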